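-- pv_equiv track=rewrite | github.com/PipeDream941/logmodel | preprocess/utils.py | get_continuous_data
-- ===== SOURCE A (Python) =====
-- from typing import List, Tuple
--
-- def get_continuous_data(data: List[int], gap=2):
--     """
--     间隔为2的数据认为是连续数据
--     :param gap: gap内的数据认为是连续的
--     :param data: 原始数据
--     :return: List[(start, end)]
--     """
--     if len(data) < 2:
--         return data
--     continuous_data = []
--     left, right = 0, 1
--     while right < len(data):
--         if data[right] - data[right - 1] > gap:
--             continuous_data.append((data[left], data[right - 1]))
--             left = right
--         right += 1
--     continuous_data.append((data[left], data[right - 1]))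
--     return continuous_data
-- ===== SOURCE B (Python) =====
-- def get_continuous_data(data, gap=2):
--     if len(data) < 2:
--         return data
--     breaks = [i for i in range(1, len(data)) if data[i] - data[i - 1] > gap]
--     starts = [0] + breaks
--     ends = [b - 1 for b in breaks] + [len(data) - 1]
--     return [(data[s], data[e]) for s, e in zip(starts, ends)]
-- ===== Notes on version B (the rewrite author's own statement) =====
-- stated objective: alternative
-- what changed: B first builds the table of break indices (where the gap is exceeded) and then assembles intervals in a separate zip pass, instead of A's fused single loop carrying a left pointer and appending as it scans.
-- outside the precondition, e.g. on get_continuous_data([5], 2): A returns [5], B returns [5]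
import Mathlib
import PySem

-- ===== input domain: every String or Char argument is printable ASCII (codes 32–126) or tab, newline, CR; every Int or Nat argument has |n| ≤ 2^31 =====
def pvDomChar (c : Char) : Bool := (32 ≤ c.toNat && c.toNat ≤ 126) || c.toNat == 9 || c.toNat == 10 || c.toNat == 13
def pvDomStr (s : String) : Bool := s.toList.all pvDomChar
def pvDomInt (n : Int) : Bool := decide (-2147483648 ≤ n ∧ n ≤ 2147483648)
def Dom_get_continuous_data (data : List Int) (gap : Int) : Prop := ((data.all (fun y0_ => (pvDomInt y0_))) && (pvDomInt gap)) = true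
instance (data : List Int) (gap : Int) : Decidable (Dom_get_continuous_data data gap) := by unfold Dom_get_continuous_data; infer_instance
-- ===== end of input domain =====

-- B builds the break-index table first and assembles intervals by zipping starts/ends, instead of A's fused left-pointer loop; same O(n) cost.


-- ===== PORT A =====
-- one step of A's while loop: state is (continuous_data, left), r is `right`
def gcdStepA (data : List Int) (gap : Int) (s : List (Int × Int) × Int) (r : Int) : List (Int × Int) × Int :=
  if PySem.List.pyGetD data r 0 - PySem.List.pyGetD data (r - 1) 0 > gap then
    (s.1 ++ [(PySem.List.pyGetD data s.2 0, PySem.List.pyGetD data (r - 1) 0)], r)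
  else s

def get_continuous_data (data : List Int) (gap : Int) : List (Int × Int) :=
  if data.length < 2 then [] -- Python returns `data` itself here; only [] is reachable under Pre_
  else
    let st := (PySem.List.pyRange 1 data.length 1).foldl (gcdStepA data gap) ([], 0)
    st.1 ++ [(PySem.List.pyGetD data st.2 0, PySem.List.pyGetD data ((data.length : Int) - 1) 0)]

-- ===== PORT B =====
def gcdBreak (data : List Int) (gap i : Int) : Bool :=
  decide (PySem.List.pyGetD data i 0 - PySem.List.pyGetD data (i - 1) 0 > gap)

def get_continuous_data_alt (data : List Int) (gap : Int) : List (Int × Int) :=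
  if data.length < 2 then [] -- same guard as A; only [] is reachable under Pre_
  else
    let breaks := (PySem.List.pyRange 1 data.length 1).filter (gcdBreak data gap)
    let starts := 0 :: breaks
    let ends := breaks.map (fun b => b - 1) ++ [(data.length : Int) - 1]
    (starts.zip ends).map (fun p => (PySem.List.pyGetD data p.1 0, PySem.List.pyGetD data p.2 0))

-- ===== PRECONDITION & SPEC =====
-- Pre_ excludes singleton lists: there the Python returns the original one-element int list,
-- which is not a value of the declared return type List (Int × Int).
def Pre_get_continuous_data (data : List Int) (gap : Int) : Prop := data.length ≠ 1
instance (data : List Int) (gap : Int) : Decidable (Pre_get_continuous_data data gap) := by unfold Pre_get_continuous_data; infer_instance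
def pvWitness_get_continuous_data : List Int × Int := ([0, 1, 5, 6], 2)

def Spec_get_continuous_data (data : List Int) (gap : Int) (out : List (Int × Int)) : Prop := out = get_continuous_data_alt data gap
instance (data : List Int) (gap : Int) (out : List (Int × Int)) : Decidable (Spec_get_continuous_data data gap out) := by unfold Spec_get_continuous_data; infer_instance

-- ===== CLAIM (what is proved, stated in full; the proofs are below) =====
def Claim_equal_get_continuous_data : Prop := ∀ (data : List Int) (gap : Int), Dom_get_continuous_data data gap → Pre_get_continuous_data data gap → Spec_get_continuous_data data gap (get_continuous_data data gap)

-- ===== LEMMAS AND PROOFS =====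

-- zipping starts with ends-plus-final splits off the last interval
theorem zip_ends_split (bs : List Int) (l x : Int) :
    (l :: bs).zip (bs.map (fun b => b - 1) ++ [x]) =
      (l :: bs).zip (bs.map (fun b => b - 1)) ++ [(bs.getLastD l, x)] := by
  induction bs generalizing l with
  | nil => simp
  | cons b bs ih =>
    rw [List.getLastD_cons, List.map_cons, List.cons_append, List.zip_cons_cons, ih b,
      List.zip_cons_cons, List.cons_append]

-- A's fold over any index list equals the interval list read off the filtered break indices
theorem foldA_eq (data : List Int) (gap : Int) (is : List Int) (acc : List (Int × Int)) (l : Int) :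
    is.foldl (gcdStepA data gap) (acc, l) =
      (acc ++ ((l :: is.filter (gcdBreak data gap)).zip
          ((is.filter (gcdBreak data gap)).map (fun b => b - 1))).map
          (fun p => (PySem.List.pyGetD data p.1 0, PySem.List.pyGetD data p.2 0)),
        (is.filter (gcdBreak data gap)).getLastD l) := by
  induction is generalizing acc l with
  | nil => simp
  | cons i rest ih =>
    by_cases h : gcdBreak data gap i
    · have hc : PySem.List.pyGetD data i 0 - PySem.List.pyGetD data (i - 1) 0 > gap := by
        simpa [gcdBreak] using h
      have hs : gcdStepA data gap (acc, l) i =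
          (acc ++ [(PySem.List.pyGetD data l 0, PySem.List.pyGetD data (i - 1) 0)], i) := by
        simp [gcdStepA, hc]
      rw [List.foldl_cons, hs, ih, List.filter_cons_of_pos h]
      simp only [List.map_cons, List.zip_cons_cons, List.getLastD_cons, List.append_assoc,
        List.singleton_append]
    · have hc : ¬ PySem.List.pyGetD data i 0 - PySem.List.pyGetD data (i - 1) 0 > gap := by
        simpa [gcdBreak] using h
      have hs : gcdStepA data gap (acc, l) i = (acc, l) := by
        simp [gcdStepA, hc]
      rw [List.foldl_cons, hs, ih, List.filter_cons_of_neg (by simpa using h)]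

-- ===== VERDICT (by name: the statement is the Claim_ definition above) =====
theorem get_continuous_data_spec : Claim_equal_get_continuous_data := by
  intro data gap _ _
  unfold Spec_get_continuous_data get_continuous_data get_continuous_data_alt
  by_cases h : data.length < 2
  · simp [h]
  · simp only [if_neg h]
    rw [foldA_eq, zip_ends_split]
    simp
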